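-- pv_equiv track=rewrite | github.com/eunjiiiiii/AlgorithmsStudy | 개인알고리즘공부/문자열/3. 로그 파일 재정렬.py | logResort
-- ===== SOURCE A (Python) =====
-- def logResort(log_list):
--     """
--     리스트 타입의 로그가 주어졌을 때 재정렬해서 출력해주는 함수
--     :param log_list: 입력 로그 리스트
--     :return: 재정렬한 로그 리스트
--     """
--
--     digits = []
--     letters = []
--
--     # 1. 문자인 로그와 숫자인 로그 분리하기
--     for log in log_list:
--         if log.split()[1].isdigit():
--             digits.append(log)
--         else:
--             letters.append(log)
--
--     # 2. 로그 재정렬하기 - lambda 이용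
--     letters.sort(key=lambda x: (x.split()[1], x.split()[0]))
--
--     return letters + digits
-- ===== SOURCE B (Python) =====
-- def logResort(log_list):
--     def key(log):
--         parts = log.split()
--         if parts[1].isdigit():
--             return (1, "", "")
--         return (0, parts[1], parts[0])
--     return sorted(log_list, key=key)
-- ===== Notes on version B (the rewrite author's own statement) =====
-- stated objective: idiomatic
-- what changed: Replaces the partition-into-two-lists + in-place sort + concatenation with a single stable sorted() call whose 3-tuple key sends letter-logs to (0, second token, first token) and all digit-logs to the equal key (1, '', ''), so stability alone keeps digit-logs in input order after the sorted letter-logs; each log is split once instead of three times.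
import Mathlib
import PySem

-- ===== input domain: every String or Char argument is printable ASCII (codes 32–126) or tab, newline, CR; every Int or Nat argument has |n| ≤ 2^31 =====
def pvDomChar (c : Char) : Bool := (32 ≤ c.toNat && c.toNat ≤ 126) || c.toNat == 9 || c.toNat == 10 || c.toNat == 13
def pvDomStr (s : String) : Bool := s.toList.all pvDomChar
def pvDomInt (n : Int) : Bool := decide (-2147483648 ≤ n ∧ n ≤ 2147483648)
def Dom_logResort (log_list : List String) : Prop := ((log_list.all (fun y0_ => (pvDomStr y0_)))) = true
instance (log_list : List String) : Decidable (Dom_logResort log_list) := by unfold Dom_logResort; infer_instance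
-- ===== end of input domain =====

-- B replaces A's partition + sort + concatenation by one stable keyed sort (idiomatic); equal on Pre_.

-- ===== PORT A =====
-- log.split()[1]  (Pre_ guarantees the index is in range, so the getD default is never used)
def pvTok (log : String) (i : Int) : String := PySem.List.pyGetD (PySem.Str.split₀ log) i ""

def logResort (log_list : List String) : List String :=
  -- for log in log_list: if log.split()[1].isdigit(): digits.append(log) else: letters.append(log)
  let pair := log_list.foldl
    (fun (acc : List String × List String) log =>
      (if PySem.Str.strIsdigit (pvTok log 1) then acc.1 ++ [log] else acc.1,
       if PySem.Str.strIsdigit (pvTok log 1) then acc.2 else acc.2 ++ [log]))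
    ([], [])
  -- letters.sort(key=lambda x: (x.split()[1], x.split()[0]));  return letters + digits
  PySem.List.sorted2 pair.2 (fun x => pvTok x 1) (fun x => pvTok x 0) ++ pair.1

-- ===== PORT B =====
-- B's key(log): (1, "", "") if log.split()[1].isdigit() else (0, log.split()[1], log.split()[0])
def pvKey1 (log : String) : Int := if PySem.Str.strIsdigit (pvTok log 1) then 1 else 0
def pvKey2 (log : String) : String := if PySem.Str.strIsdigit (pvTok log 1) then "" else pvTok log 1
def pvKey3 (log : String) : String := if PySem.Str.strIsdigit (pvTok log 1) then "" else pvTok log 0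
-- Python's lexicographic comparison of the 3-tuple key, component by component
def pvLtB (a b : String) : Bool :=
  decide (pvKey1 a < pvKey1 b) ||
    (!decide (pvKey1 b < pvKey1 a) &&
      (decide (pvKey2 a < pvKey2 b) || (!decide (pvKey2 b < pvKey2 a) && decide (pvKey3 a < pvKey3 b))))

-- sorted(log_list, key=key): PySem's stable insertion sort with the 3-tuple lex comparison written out
def logResort_alt (log_list : List String) : List String :=
  log_list.foldl (fun acc x => PySem.List.insertBy pvLtB x acc) []

-- ===== PRECONDITION & SPEC =====
-- Pre_ excludes exactly the inputs where Python A raises IndexError: a log whose split() has fewer than 2 tokens.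
def Pre_logResort (log_list : List String) : Prop :=
  ∀ log ∈ log_list, 2 ≤ (PySem.Str.split₀ log).length
instance (log_list : List String) : Decidable (Pre_logResort log_list) := by unfold Pre_logResort; infer_instance

def pvWitness_logResort : List String := ["dig1 8 1 5 1", "let1 art can", "dig2 3 6", "let2 own kit dig", "let3 art zero"]

def Spec_logResort (log_list : List String) (out : List String) : Prop := out = logResort_alt log_list
instance (log_list : List String) (out : List String) : Decidable (Spec_logResort log_list out) := by unfold Spec_logResort; infer_instance

-- ===== CLAIM (what is proved, stated in full; the proofs are below) =====
def Claim_equal_logResort : Prop := ∀ (log_list : List String), Dom_logResort log_list → Pre_logResort log_list → Spec_logResort log_list (logResort log_list)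

-- ===== LEMMAS AND PROOFS =====

-- the comparator A's letter sort uses (sorted2's lex comparison on (tok 1, tok 0))
def pvLtA (a b : String) : Bool :=
  decide (pvTok a 1 < pvTok b 1) || (!decide (pvTok b 1 < pvTok a 1) && decide (pvTok a 0 < pvTok b 0))

lemma insertBy_congr {α : Type} (f g : α → α → Bool) (x : α) (ys : List α)
    (h : ∀ y ∈ ys, f x y = g x y) :
    PySem.List.insertBy f x ys = PySem.List.insertBy g x ys := by
  induction ys with
  | nil => rfl
  | cons y t ih =>
    simp only [PySem.List.insertBy, h y (List.mem_cons_self)]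
    split
    · rfl
    · exact congrArg (y :: ·) (ih fun z hz => h z (List.mem_cons_of_mem y hz))

lemma insertBy_append_of_forall_before {α : Type} (before : α → α → Bool) (x : α) (L D : List α)
    (h : ∀ d ∈ D, before x d = true) :
    PySem.List.insertBy before x (L ++ D) = PySem.List.insertBy before x L ++ D := by
  induction L with
  | nil =>
    cases D with
    | nil => rfl
    | cons d t => simp [PySem.List.insertBy, h d (List.mem_cons_self)]
  | cons y t ih =>
    simp only [List.cons_append, PySem.List.insertBy]
    split
    · rfl
    · simp [ih]

lemma ltB_letter_digit {a b : String} (ha : PySem.Str.strIsdigit (pvTok a 1) = false)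
    (hb : PySem.Str.strIsdigit (pvTok b 1) = true) : pvLtB a b = true := by
  simp only [pvLtB, pvKey1, ha, hb, if_true, if_false, Bool.false_eq_true]
  norm_num

lemma ltB_digit_any {a b : String} (ha : PySem.Str.strIsdigit (pvTok a 1) = true) :
    pvLtB a b = false := by
  by_cases hb : PySem.Str.strIsdigit (pvTok b 1) = true
  · simp only [pvLtB, pvKey1, pvKey2, pvKey3, ha, hb, if_true]
    simp
  · rw [Bool.not_eq_true] at hb
    simp only [pvLtB, pvKey1, pvKey2, pvKey3, ha, hb, if_true, Bool.false_eq_true, if_false]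
    simp

lemma ltB_letter_letter {a b : String} (ha : PySem.Str.strIsdigit (pvTok a 1) = false)
    (hb : PySem.Str.strIsdigit (pvTok b 1) = false) : pvLtB a b = pvLtA a b := by
  simp only [pvLtB, pvLtA, pvKey1, pvKey2, pvKey3, ha, hb, Bool.false_eq_true, if_false]
  simp

-- main invariant: folding B's insertions from a split accumulator keeps letters (sorted by pvLtA) in front of digits
lemma main_invariant (xs : List String) :
    ∀ (L D : List String),
    (∀ l ∈ L, PySem.Str.strIsdigit (pvTok l 1) = false) →
    (∀ d ∈ D, PySem.Str.strIsdigit (pvTok d 1) = true) →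
    xs.foldl (fun acc x => PySem.List.insertBy pvLtB x acc) (L ++ D)
      = (xs.filter (fun x => !PySem.Str.strIsdigit (pvTok x 1))).foldl
          (fun acc x => PySem.List.insertBy pvLtA x acc) L
        ++ (D ++ xs.filter (fun x => PySem.Str.strIsdigit (pvTok x 1))) := by
  induction xs with
  | nil => intro L D _ _; simp
  | cons x t ih =>
    intro L D hL hD
    by_cases hx : PySem.Str.strIsdigit (pvTok x 1) = true
    · have h1 : PySem.List.insertBy pvLtB x (L ++ D) = (L ++ D) ++ [x] :=
        PySem.List.insertBy_of_forall_not_before _ _ _ (fun y _ => ltB_digit_any hx)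
      have hD' : ∀ d ∈ D ++ [x], PySem.Str.strIsdigit (pvTok d 1) = true := by
        intro d hd
        rcases List.mem_append.mp hd with h | h
        · exact hD d h
        · simp at h; subst h; exact hx
      have hxc : PySem.Chars.strIsdigit (pvTok x 1).toList = true := hx
      simp only [List.foldl_cons, h1, List.append_assoc]
      rw [ih L (D ++ [x]) hL hD']
      simp [hxc]
    · have hx' : PySem.Str.strIsdigit (pvTok x 1) = false := by simpa using hx
      have h1 : PySem.List.insertBy pvLtB x (L ++ D) = PySem.List.insertBy pvLtB x L ++ D :=
        insertBy_append_of_forall_before _ _ _ _ (fun d hd => ltB_letter_digit hx' (hD d hd))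
      have h2 : PySem.List.insertBy pvLtB x L = PySem.List.insertBy pvLtA x L :=
        insertBy_congr _ _ _ _ (fun y hy => ltB_letter_letter hx' (hL y hy))
      have hL' : ∀ l ∈ PySem.List.insertBy pvLtA x L, PySem.Str.strIsdigit (pvTok l 1) = false := by
        intro l hl
        rcases (PySem.List.mem_insertBy pvLtA x l L).mp hl with h | h
        · subst h; exact hx'
        · exact hL l h
      have hxc : PySem.Chars.strIsdigit (pvTok x 1).toList = false := hx'
      simp only [List.foldl_cons, h1, h2]
      rw [ih (PySem.List.insertBy pvLtA x L) D hL' hD]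
      simp [hxc]

-- A's partition loop produces the two filters
lemma partition_loop (xs : List String) :
    xs.foldl
      (fun (acc : List String × List String) log =>
        (if PySem.Str.strIsdigit (pvTok log 1) then acc.1 ++ [log] else acc.1,
         if PySem.Str.strIsdigit (pvTok log 1) then acc.2 else acc.2 ++ [log]))
      ([], [])
      = (xs.filter (fun x => PySem.Str.strIsdigit (pvTok x 1)),
         xs.filter (fun x => !PySem.Str.strIsdigit (pvTok x 1))) := by
  rw [PySem.List.foldl_prod_mk
      (f := fun acc log => if PySem.Str.strIsdigit (pvTok log 1) then acc ++ [log] else acc)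
      (g := fun acc log => if PySem.Str.strIsdigit (pvTok log 1) then acc else acc ++ [log])]
  rw [PySem.List.foldl_append_if_eq_filter]
  rw [PySem.List.foldl_congr_mem _
      (fun acc log => if PySem.Str.strIsdigit (pvTok log 1) then acc else acc ++ [log])
      (fun acc log => if !PySem.Str.strIsdigit (pvTok log 1) then acc ++ [log] else acc) []
      (by intro acc x _
          cases h : PySem.Chars.strIsdigit (pvTok x 1).toList <;> simp [PySem.Str.strIsdigit, h])]
  rw [PySem.List.foldl_append_if_eq_filter]
  simp

-- ===== VERDICT (by name: the statement is the Claim_ definition above) =====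
theorem logResort_spec : Claim_equal_logResort := by
  intro log_list _ _
  unfold Spec_logResort logResort logResort_alt
  simp only [partition_loop]
  have h := main_invariant log_list [] [] (by simp) (by simp)
  simp only [List.append_nil, List.nil_append] at h
  rw [h]
  rfl
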